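-- pv_equiv track=rewrite | github.com/nya3jp/aoc2020 | day01/day01b.py | solve
-- ===== SOURCE A (Python) =====
-- from typing import List, Optional
--
-- def solve(ns: List[int]) -> Optional[int]:
--     for i, a in enumerate(ns):
--         bs = ns[i+1:]
--         for j, b in enumerate(bs):
--             cs = bs[j+1:]
--             for c in cs:
--                 if a + b + c == 2020:
--                     return a * b * c
--     return None
-- ===== SOURCE B (Python) =====
-- from typing import List, Optional
--
-- def solve(ns: List[int]) -> Optional[int]:
--     # O(n^2): for each a, keep a multiset (dict counter) of the elements still
--     # ahead of b; the third element is forced to be c = 2020 - a - b.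
--     for i, a in enumerate(ns):
--         rest = ns[i+1:]
--         remaining = {}
--         for x in rest:
--             remaining[x] = remaining.get(x, 0) + 1
--         for b in rest:
--             remaining[b] -= 1
--             c = 2020 - a - b
--             if remaining.get(c, 0) > 0:
--                 return a * b * c
--     return None
-- ===== Notes on version B (the rewrite author's own statement) =====
-- stated objective: faster
-- what changed: Replaced the innermost scan over cs by a multiset (dict counter) of the elements after b, looked up at the forced complement c = 2020 - a - b, turning the triple loop into a double loop.
import Mathlib
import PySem

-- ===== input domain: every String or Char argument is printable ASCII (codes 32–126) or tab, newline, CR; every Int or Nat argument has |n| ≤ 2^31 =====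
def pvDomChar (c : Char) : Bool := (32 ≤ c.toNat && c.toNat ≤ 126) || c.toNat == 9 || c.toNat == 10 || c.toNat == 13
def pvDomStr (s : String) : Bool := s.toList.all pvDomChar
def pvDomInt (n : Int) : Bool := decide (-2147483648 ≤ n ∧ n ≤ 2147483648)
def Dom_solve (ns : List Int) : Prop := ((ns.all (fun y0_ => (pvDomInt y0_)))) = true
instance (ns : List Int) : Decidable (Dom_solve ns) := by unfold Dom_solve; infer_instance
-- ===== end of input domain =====

-- B replaces A's innermost scan by a counter of the elements after b, looked up
-- at the forced complement 2020 - a - b (O(n^2) instead of O(n^3)).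

-- ===== PORT A =====
-- innermost loop: 'for c in cs: if a + b + c == 2020: return a * b * c'
def solveLoopC (a b : Int) : List Int → Option Int
  | [] => none
  | c :: cs => if a + b + c = 2020 then some (a * b * c) else solveLoopC a b cs

-- middle loop: 'for j, b in enumerate(bs): cs = bs[j+1:]; …'
-- (the tail of the structural recursion IS bs[j+1:])
def solveLoopB (a : Int) : List Int → Option Int
  | [] => none
  | b :: bs =>
    match solveLoopC a b bs with
    | some r => some r
    | none => solveLoopB a bs

-- outer loop: 'for i, a in enumerate(ns): bs = ns[i+1:]; …'
def solve : List Int → Option Int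
  | [] => none
  | a :: rest =>
    match solveLoopB a rest with
    | some r => some r
    | none => solve rest

-- ===== PORT B =====
-- 'for b in rest: remaining[b] -= 1; c = 2020 - a - b; if remaining.get(c, 0) > 0: return a*b*c'
-- (remaining[b] -= 1 is exact via modify: b is always a key of the counter here)
def altLoopB (a : Int) : List Int → PySem.Dict Int Int → Option Int
  | [], _ => none
  | b :: bs, rem =>
    let rem' := rem.modify b 0 (· - 1)
    let c := 2020 - a - b
    if rem'.getD c 0 > 0 then some (a * b * c) else altLoopB a bs rem'

-- 'remaining = {}; for x in rest: remaining[x] = remaining.get(x, 0) + 1'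
def altCounter (rest : List Int) : PySem.Dict Int Int :=
  rest.foldl (fun d x => d.insert x (d.getD x 0 + 1)) PySem.Dict.empty

def solve_alt : List Int → Option Int
  | [] => none
  | a :: rest =>
    match altLoopB a rest (altCounter rest) with
    | some r => some r
    | none => solve_alt rest

-- ===== PRECONDITION & SPEC =====
def Spec_solve (ns : List Int) (out : Option Int) : Prop := out = solve_alt ns
instance (ns : List Int) (out : Option Int) : Decidable (Spec_solve ns out) := by unfold Spec_solve; infer_instance

-- ===== CLAIM (what is proved, stated in full; the proofs are below) =====
def Claim_equal_solve : Prop := ∀ (ns : List Int), Dom_solve ns → Spec_solve ns (solve ns)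

-- ===== LEMMAS AND PROOFS =====

-- A's innermost loop returns a value iff the forced complement 2020 - a - b occurs in cs
theorem solveLoopC_char (a b : Int) (cs : List Int) :
    solveLoopC a b cs =
      if (2020 - a - b) ∈ cs then some (a * b * (2020 - a - b)) else none := by
  induction cs with
  | nil => simp [solveLoopC]
  | cons c cs ih =>
    simp only [solveLoopC, List.mem_cons]
    by_cases h : a + b + c = 2020
    · have hc : c = 2020 - a - b := by omega
      simp [hc]
    · have hc : ¬ (2020 - a - b = c) := by omega
      simp [h, hc, ih]

-- B's middle loop agrees with A's, whenever rem counts the current suffix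
theorem altLoopB_eq (a : Int) (bs : List Int) :
    ∀ rem : PySem.Dict Int Int,
      (∀ x, rem.getD x 0 = (bs.count x : Int)) →
      altLoopB a bs rem = solveLoopB a bs := by
  induction bs with
  | nil => intro rem _; rfl
  | cons b bs ih =>
    intro rem hrem
    have hrem' : ∀ x, (rem.modify b 0 (· - 1)).getD x 0 = (bs.count x : Int) := by
      intro x
      rw [PySem.Dict.getD_modify]
      rcases eq_or_ne x b with h | h
      · rw [if_pos h, hrem b, h, List.count_cons_self]
        push_cast; ring
      · rw [if_neg h, hrem x, List.count_cons_of_ne (Ne.symm h)]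
    simp only [altLoopB, solveLoopB, solveLoopC_char a b bs, hrem' (2020 - a - b)]
    by_cases hmem : (2020 - a - b) ∈ bs
    · have : 0 < bs.count (2020 - a - b) := List.count_pos_iff.mpr hmem
      have : (0 : Int) < (bs.count (2020 - a - b) : Int) := by exact_mod_cast this
      simp [hmem, this]
    · have : bs.count (2020 - a - b) = 0 := List.count_eq_zero.mpr hmem
      simp [hmem, this, ih _ hrem']

theorem altCounter_count (rest : List Int) (x : Int) :
    (altCounter rest).getD x 0 = (rest.count x : Int) := by
  simp [altCounter, PySem.Dict.foldl_insert_getD_add_one_eq_counter,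
    PySem.Dict.getD_counter]

theorem solve_eq_alt (ns : List Int) : solve ns = solve_alt ns := by
  induction ns with
  | nil => rfl
  | cons a rest ih =>
    simp only [solve, solve_alt, altLoopB_eq a rest (altCounter rest) (altCounter_count rest), ih]

-- ===== VERDICT (by name: the statement is the Claim_ definition above) =====
theorem solve_spec : Claim_equal_solve := by
  intro ns _
  unfold Spec_solve
  exact solve_eq_alt ns
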